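-- pv_equiv track=rewrite | github.com/emacsen/changemonger | elements.py | feature_grouper
-- ===== SOURCE A (Python) =====
-- def feature_grouper(coll):
--     """Takes in a collection of elements and features and groups them
--     by feature in the supplied order
--     """
--     # This function isn't very efficient and should likely be
--     # rewritten
--     grouped = []
--     while coll:
--         feature = coll[0][1][0]
--         eles = [f[0] for f in coll if feature in f[1]]
--         grouped.append( (eles, feature) )
--         coll = [f for f in coll if feature not in f[1]]
--     return grouped
-- ===== SOURCE B (Python) =====
-- def feature_grouper(coll):
--     """Takes in a collection of elements and features and groups them
--     by feature in the supplied order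
--     """
--     # Single pass: each element joins the earliest-created group whose
--     # feature it carries; otherwise it opens a new group keyed by its
--     # first feature.
--     groups = []          # list of ([elements], feature)
--     index = {}           # feature -> position of its group
--     for ele, feats in coll:
--         idxs = [index[f] for f in feats if f in index]
--         if idxs:
--             groups[min(idxs)][0].append(ele)
--         else:
--             index[feats[0]] = len(groups)
--             groups.append(([ele], feats[0]))
--     return [(eles, feature) for eles, feature in groups]
-- ===== Notes on version B (the rewrite author's own statement) =====
-- stated objective: faster
-- what changed: Replaces A's round-based while-loop that rescans and refilters the whole remaining collection once per distinct feature with a single pass over the elements that assigns each element to the earliest-created matching group via a feature-to-group-index dictionary.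
-- outside the precondition, e.g. on feature_grouper([(1, [])]): A raises IndexError, B raises IndexError
import Mathlib
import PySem

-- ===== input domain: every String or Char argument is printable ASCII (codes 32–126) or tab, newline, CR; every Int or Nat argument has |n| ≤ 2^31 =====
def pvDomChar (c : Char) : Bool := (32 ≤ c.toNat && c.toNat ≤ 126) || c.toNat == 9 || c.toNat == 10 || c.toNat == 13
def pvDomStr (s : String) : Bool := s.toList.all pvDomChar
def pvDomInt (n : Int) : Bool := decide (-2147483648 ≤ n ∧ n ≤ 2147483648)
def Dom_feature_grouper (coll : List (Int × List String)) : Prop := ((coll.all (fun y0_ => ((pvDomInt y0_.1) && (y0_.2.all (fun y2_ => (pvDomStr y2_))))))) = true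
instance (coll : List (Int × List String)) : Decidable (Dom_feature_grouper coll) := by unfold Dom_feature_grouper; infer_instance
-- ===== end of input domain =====

-- B replaces A's repeated rescans of the remaining collection with one pass over the
-- elements using a feature->group-index dictionary (objective: faster).


-- ===== PORT A =====
def feature_grouper (coll : List (Int × List String)) : List (List Int × String) :=
  match coll with
  | [] => []
  | (e, fs) :: rest =>
    match fs with
    | [] => []  -- Python raises IndexError on coll[0][1][0] here; excluded by Pre_
    | feature :: ftail =>
      let c := (e, feature :: ftail) :: rest
      ((c.filter (fun f => f.2.contains feature)).map (fun f => f.1), feature)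
        :: feature_grouper (c.filter (fun f => !(f.2.contains feature)))
termination_by coll.length
decreasing_by
  simp only [List.filter_cons, List.contains_cons, BEq.rfl, Bool.true_or, Bool.not_true,
    Bool.false_eq_true, if_false, List.length_cons]
  exact Nat.lt_succ_of_le (List.length_filter_le _ _)

-- ===== PORT B =====
-- one step of Source B's for-loop: state = (groups, index)
def fgLoop (st : (List (List Int × String)) × PySem.Dict String Nat)
    (p : Int × List String) : (List (List Int × String)) × PySem.Dict String Nat :=
  match (p.2.filterMap (fun f => st.2.get? f)).min? with
  | some i => (st.1.modify i (fun g => (g.1 ++ [p.1], g.2)), st.2)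
  | none =>
    match p.2 with
    | [] => st  -- Source B raises IndexError on feats[0] here; excluded by Pre_
    | f0 :: _ => (st.1 ++ [([p.1], f0)], st.2.insert f0 st.1.length)

def feature_grouper_alt (coll : List (Int × List String)) : List (List Int × String) :=
  (coll.foldl fgLoop ([], PySem.Dict.empty)).1

-- ===== PRECONDITION & SPEC =====
-- Pre_ excludes collections containing an element with an empty feature list: there
-- Python A raises IndexError (coll[0][1][0], eventually) and Source B raises too (feats[0]).
def Pre_feature_grouper (coll : List (Int × List String)) : Prop := ∀ p ∈ coll, p.2 ≠ []
instance (coll : List (Int × List String)) : Decidable (Pre_feature_grouper coll) := by unfold Pre_feature_grouper; infer_instance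
def pvWitness_feature_grouper : (List (Int × List String)) := [(1, ["a"]), (2, ["b", "a"]), (3, ["b"])]
def Spec_feature_grouper (coll : List (Int × List String)) (out : List (List Int × String)) : Prop := out = feature_grouper_alt coll
instance (coll : List (Int × List String)) (out : List (List Int × String)) : Decidable (Spec_feature_grouper coll out) := by unfold Spec_feature_grouper; infer_instance

-- ===== CLAIM (what is proved, stated in full; the proofs are below) =====
def Claim_equal_feature_grouper : Prop := ∀ (coll : List (Int × List String)), Dom_feature_grouper coll → Pre_feature_grouper coll → Spec_feature_grouper coll (feature_grouper coll)

-- ===== LEMMAS AND PROOFS =====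

-- first position of f in gs (none if absent)
def posOf (gs : List String) (f : String) : Option Nat :=
  match gs with
  | [] => none
  | g :: t => if g = f then some 0 else (posOf t f).map (· + 1)

-- position of the earliest-created group an element with feature list fs joins
def minPos (gs : List String) (fs : List String) : Option Nat :=
  (fs.filterMap (posOf gs)).min?

-- elements of coll assigned to group i (given chosen features gs)
def assigned (gs : List String) (coll : List (Int × List String)) (i : Nat) : List Int :=
  (coll.filter (fun p => decide (minPos gs p.2 = some i))).map Prod.fst

-- groups, each extended by the elements of coll assigned to it (positions start at i)
def updG (gs : List String) (coll : List (Int × List String)) : Nat → List (List Int × String) → List (List Int × String)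
  | _, [] => []
  | i, g :: t => (g.1 ++ assigned gs coll i, g.2) :: updG gs coll (i + 1) t

lemma posOf_lt {gs : List String} {f : String} {j : Nat} (h : posOf gs f = some j) : j < gs.length := by
  induction gs generalizing j with
  | nil => simp [posOf] at h
  | cons g t ih =>
    simp only [posOf] at h
    split at h
    · simp at h; subst h; simp
    · cases hp : posOf t f with
      | none => simp [hp] at h
      | some k => rw [hp] at h; simp at h; subst h; simpa using Nat.succ_lt_succ (ih hp)

lemma posOf_append1 (gs : List String) (f0 f : String) :
    posOf (gs ++ [f0]) f = (posOf gs f).or (if f = f0 then some gs.length else none) := by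
  induction gs with
  | nil => simp [posOf, eq_comm]
  | cons g t ih =>
    simp only [List.cons_append, posOf, ih]
    split
    · rfl
    · cases hp : posOf t f with
      | none => split <;> simp
      | some k => simp

lemma minPos_nil (fs : List String) : minPos [] fs = none := by
  simp [minPos, posOf]

lemma minPos_some_lt {gs fs : List String} {j : Nat} (h : minPos gs fs = some j) : j < gs.length := by
  unfold minPos at h
  have hm := (List.min?_eq_some_iff.mp h).1
  obtain ⟨f, _, hf⟩ := List.mem_filterMap.mp hm
  exact posOf_lt hf

lemma minPos_none_iff {gs fs : List String} : minPos gs fs = none ↔ ∀ f ∈ fs, posOf gs f = none := by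
  unfold minPos
  rw [List.min?_eq_none_iff, List.filterMap_eq_nil_iff]

lemma mem_filterMap_posOf_append {gs fs : List String} {f0 : String} (hf0 : posOf gs f0 = none) {x : Nat} :
    x ∈ fs.filterMap (posOf (gs ++ [f0])) ↔ x ∈ fs.filterMap (posOf gs) ∨ (x = gs.length ∧ f0 ∈ fs) := by
  constructor
  · intro hx
    obtain ⟨f, hfmem, hfx⟩ := List.mem_filterMap.mp hx
    rw [posOf_append1] at hfx
    cases hp : posOf gs f with
    | some k =>
      rw [hp] at hfx; simp at hfx
      exact Or.inl (List.mem_filterMap.mpr ⟨f, hfmem, by rw [hp, hfx]⟩)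
    | none =>
      rw [hp] at hfx; simp only [Option.none_or] at hfx
      split at hfx
      · rename_i hff0; simp at hfx; exact Or.inr ⟨hfx.symm, by rwa [hff0] at hfmem⟩
      · simp at hfx
  · rintro (hx | ⟨rfl, hf0mem⟩)
    · obtain ⟨f, hfmem, hfx⟩ := List.mem_filterMap.mp hx
      refine List.mem_filterMap.mpr ⟨f, hfmem, ?_⟩
      rw [posOf_append1, hfx]; rfl
    · refine List.mem_filterMap.mpr ⟨f0, hf0mem, ?_⟩
      rw [posOf_append1, hf0]; simp

lemma minPos_ext_some {gs fs : List String} {f0 : String} (hf0 : posOf gs f0 = none) {j : Nat}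
    (h : minPos gs fs = some j) : minPos (gs ++ [f0]) fs = some j := by
  have hj := minPos_some_lt h
  unfold minPos at h ⊢
  rw [List.min?_eq_some_iff] at h ⊢
  obtain ⟨hmem, hmin⟩ := h
  refine ⟨(mem_filterMap_posOf_append hf0).mpr (Or.inl hmem), ?_⟩
  intro b hb
  rcases (mem_filterMap_posOf_append hf0).mp hb with hb' | ⟨rfl, _⟩
  · exact hmin b hb'
  · omega

lemma minPos_ext_new {gs fs : List String} {f0 : String} (hf0 : posOf gs f0 = none)
    (h : minPos gs fs = none) (hmem : f0 ∈ fs) : minPos (gs ++ [f0]) fs = some gs.length := by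
  have hempty : fs.filterMap (posOf gs) = [] := by
    unfold minPos at h; exact List.min?_eq_none_iff.mp h
  unfold minPos
  rw [List.min?_eq_some_iff]
  constructor
  · exact (mem_filterMap_posOf_append hf0).mpr (Or.inr ⟨rfl, hmem⟩)
  · intro b hb
    rcases (mem_filterMap_posOf_append hf0).mp hb with hb' | ⟨rfl, _⟩
    · rw [hempty] at hb'; simp at hb'
    · omega

lemma minPos_ext_none {gs fs : List String} {f0 : String} (hf0 : posOf gs f0 = none)
    (h : minPos gs fs = none) (hmem : f0 ∉ fs) : minPos (gs ++ [f0]) fs = none := by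
  have hempty : fs.filterMap (posOf gs) = [] := by
    unfold minPos at h; exact List.min?_eq_none_iff.mp h
  unfold minPos
  rw [List.min?_eq_none_iff]
  rw [List.eq_nil_iff_forall_not_mem]
  intro x hx
  rcases (mem_filterMap_posOf_append hf0).mp hx with hx' | ⟨_, hf⟩
  · rw [hempty] at hx'; simp at hx'
  · exact hmem hf

lemma minPos_ext_none_iff {gs fs : List String} {f0 : String} (hf0 : posOf gs f0 = none) :
    minPos (gs ++ [f0]) fs = none ↔ minPos gs fs = none ∧ f0 ∉ fs := by
  constructor
  · intro h
    cases hm : minPos gs fs with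
    | some j => rw [minPos_ext_some hf0 hm] at h; simp at h
    | none =>
      refine ⟨rfl, fun hmem => ?_⟩
      rw [minPos_ext_new hf0 hm hmem] at h; simp at h
  · rintro ⟨h1, h2⟩; exact minPos_ext_none hf0 h1 h2

lemma minPos_ext_len_iff {gs fs : List String} {f0 : String} (hf0 : posOf gs f0 = none) :
    minPos (gs ++ [f0]) fs = some gs.length ↔ minPos gs fs = none ∧ f0 ∈ fs := by
  constructor
  · intro h
    cases hm : minPos gs fs with
    | some j =>
      rw [minPos_ext_some hf0 hm] at h
      have := minPos_some_lt hm
      simp at h; omega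
    | none =>
      by_cases hmem : f0 ∈ fs
      · exact ⟨rfl, hmem⟩
      · rw [minPos_ext_none hf0 hm hmem] at h; simp at h
  · rintro ⟨h1, h2⟩; exact minPos_ext_new hf0 h1 h2

lemma minPos_ext_lt_iff {gs fs : List String} {f0 : String} (hf0 : posOf gs f0 = none) {j : Nat}
    (hj : j < gs.length) : minPos (gs ++ [f0]) fs = some j ↔ minPos gs fs = some j := by
  constructor
  · intro h
    cases hm : minPos gs fs with
    | some k => rw [minPos_ext_some hf0 hm] at h; rw [← h]
    | none =>
      by_cases hmem : f0 ∈ fs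
      · rw [minPos_ext_new hf0 hm hmem] at h; simp at h; omega
      · rw [minPos_ext_none hf0 hm hmem] at h; simp at h
  · exact minPos_ext_some hf0

lemma assigned_nil (gs : List String) (i : Nat) : assigned gs [] i = [] := by
  simp [assigned]

lemma assigned_cons_eq {gs fs : List String} {i : Nat} (e : Int) (rest : List (Int × List String))
    (h : minPos gs fs = some i) : assigned gs ((e, fs) :: rest) i = e :: assigned gs rest i := by
  simp [assigned, h]

lemma assigned_cons_ne {gs fs : List String} {i : Nat} (e : Int) (rest : List (Int × List String))
    (h : minPos gs fs ≠ some i) : assigned gs ((e, fs) :: rest) i = assigned gs rest i := by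
  simp [assigned, h]

lemma assigned_congr {gsA gsB : List String} {c : List (Int × List String)} {j : Nat}
    (h : ∀ p ∈ c, (minPos gsA p.2 = some j ↔ minPos gsB p.2 = some j)) :
    assigned gsA c j = assigned gsB c j := by
  unfold assigned
  congr 1
  exact List.filter_congr (fun p hp => decide_eq_decide.mpr (h p hp))

lemma updG_nil_coll (gs : List String) : ∀ (i : Nat) (groups : List (List Int × String)),
    updG gs [] i groups = groups := by
  intro i groups
  induction groups generalizing i with
  | nil => rfl
  | cons g t ih => simp [updG, assigned_nil, ih]

lemma updG_ext {gsA gsB : List String} {cA cB : List (Int × List String)} :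
    ∀ (groups : List (List Int × String)) (i : Nat),
    (∀ j, i ≤ j → j < i + groups.length → assigned gsA cA j = assigned gsB cB j) →
    updG gsA cA i groups = updG gsB cB i groups := by
  intro groups
  induction groups with
  | nil => intro i _; rfl
  | cons g t ih =>
    intro i h
    simp only [updG]
    rw [h i (le_refl i) (by simp), ih (i + 1) (fun j hj1 hj2 => h j (by omega) (by simp at hj2 ⊢; omega))]

lemma updG_append (gs : List String) (c : List (Int × List String)) (x : List Int × String) :
    ∀ (groups : List (List Int × String)) (i : Nat),
    updG gs c i (groups ++ [x]) = updG gs c i groups ++ [(x.1 ++ assigned gs c (i + groups.length), x.2)] := by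
  intro groups
  induction groups with
  | nil => intro i; simp [updG]
  | cons g t ih =>
    intro i
    simp only [List.cons_append, updG, ih (i + 1), List.length_cons]
    rw [show i + 1 + t.length = i + (t.length + 1) from by omega]

lemma updG_modify (gs fs : List String) (e : Int) (rest : List (Int × List String)) :
    ∀ (i : Nat) (groups : List (List Int × String)) (i0 : Nat),
    minPos gs fs = some (i0 + i) → i < groups.length →
    updG gs ((e, fs) :: rest) i0 groups = updG gs rest i0 (groups.modify i (fun g => (g.1 ++ [e], g.2))) := by
  intro i
  induction i with
  | zero =>
    intro groups i0 hm hlen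
    cases groups with
    | nil => simp at hlen
    | cons g t =>
      have hmod : (g :: t).modify 0 (fun g => (g.1 ++ [e], g.2)) = (g.1 ++ [e], g.2) :: t := by simp
      rw [hmod]
      simp only [updG]
      refine List.cons_eq_cons.mpr ⟨?_, ?_⟩
      · rw [assigned_cons_eq e rest (by simpa using hm)]
        simp [List.append_assoc]
      · exact updG_ext t (i0 + 1) (fun j hj1 hj2 => assigned_cons_ne e rest (by rw [hm]; intro hc; simp at hc; omega))
  | succ k ih =>
    intro groups i0 hm hlen
    cases groups with
    | nil => simp at hlen
    | cons g t =>
      have hmod : (g :: t).modify (k + 1) (fun g => (g.1 ++ [e], g.2)) = g :: t.modify k (fun g => (g.1 ++ [e], g.2)) := by simp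
      rw [hmod]
      simp only [updG]
      refine List.cons_eq_cons.mpr ⟨?_, ?_⟩
      · rw [assigned_cons_ne e rest (by rw [hm]; intro hc; simp at hc)]
      · exact ih t (i0 + 1) (by rw [hm]; congr 1; omega) (by simpa using hlen)

lemma snd_modify (e : Int) : ∀ (l : List (List Int × String)) (i : Nat),
    (l.modify i (fun g => (g.1 ++ [e], g.2))).map Prod.snd = l.map Prod.snd := by
  intro l
  induction l with
  | nil => intro i; simp
  | cons g t ih =>
    intro i
    cases i with
    | zero => simp
    | succ k => simp [ih]

lemma feature_grouper_nil : feature_grouper [] = [] := by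
  rw [feature_grouper]

lemma feature_grouper_cons (e : Int) (f0 : String) (ftail : List String) (rest : List (Int × List String)) :
    feature_grouper ((e, f0 :: ftail) :: rest) =
      (e :: (rest.filter (fun f => f.2.contains f0)).map (fun f => f.1), f0)
        :: feature_grouper (rest.filter (fun f => !(f.2.contains f0))) := by
  rw [feature_grouper]
  simp

lemma fold_eq : ∀ (coll : List (Int × List String)) (groups : List (List Int × String)) (index : PySem.Dict String Nat),
    (∀ p ∈ coll, p.2 ≠ []) →
    (∀ f, index.get? f = posOf (groups.map Prod.snd) f) →
    (coll.foldl fgLoop (groups, index)).1 =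
      updG (groups.map Prod.snd) coll 0 groups
        ++ feature_grouper (coll.filter (fun p => decide (minPos (groups.map Prod.snd) p.2 = none))) := by
  intro coll
  induction coll with
  | nil =>
    intro groups index _ _
    simp only [List.foldl_nil, List.filter_nil, feature_grouper_nil, List.append_nil]
    rw [updG_nil_coll]
  | cons p rest ih =>
    obtain ⟨e, fs⟩ := p
    intro groups index hpre hinv
    have hprerest : ∀ q ∈ rest, q.2 ≠ [] := fun q hq => hpre q (List.mem_cons_of_mem _ hq)
    have hfs : fs ≠ [] := hpre (e, fs) (List.mem_cons_self)
    have hidxs : fs.filterMap (fun f => index.get? f) = fs.filterMap (posOf (groups.map Prod.snd)) :=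
      List.filterMap_congr (fun f _ => hinv f)
    have hmin : (fs.filterMap (fun f => index.get? f)).min? = minPos (groups.map Prod.snd) fs := by
      unfold minPos; rw [hidxs]
    rw [List.foldl_cons]
    cases hm : minPos (groups.map Prod.snd) fs with
    | some i =>
      have hloop : fgLoop (groups, index) (e, fs) = (groups.modify i (fun g => (g.1 ++ [e], g.2)), index) := by
        unfold fgLoop
        rw [show ((e, fs).2.filterMap (fun f => (groups, index).2.get? f)).min? = some i from by rw [← hm, ← hmin]]
      rw [hloop]
      have hlt : i < groups.length := by
        have := minPos_some_lt hm; simpa using this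
      rw [ih _ index hprerest (by intro f; rw [hinv f, snd_modify]), snd_modify]
      rw [← updG_modify _ fs e rest i groups 0 (by simpa using hm) hlt]
      congr 1
      rw [List.filter_cons]
      simp [hm]
    | none =>
      cases fs with
      | nil => exact absurd rfl hfs
      | cons f0 ftail =>
        have hf0 : posOf (groups.map Prod.snd) f0 = none :=
          minPos_none_iff.mp hm f0 (List.mem_cons_self)
        have hloop : fgLoop (groups, index) (e, f0 :: ftail) = (groups ++ [([e], f0)], index.insert f0 groups.length) := by
          unfold fgLoop
          rw [show ((e, f0 :: ftail).2.filterMap (fun f => (groups, index).2.get? f)).min? = none from by rw [← hm, ← hmin]]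
        rw [hloop]
        have hsnd : ((groups ++ [([e], f0)]).map Prod.snd) = groups.map Prod.snd ++ [f0] := by simp
        have hinv' : ∀ f, (index.insert f0 groups.length).get? f = posOf ((groups ++ [([e], f0)]).map Prod.snd) f := by
          intro f
          rw [hsnd, PySem.Dict.get?_insert, posOf_append1, hinv f]
          by_cases hff : f = f0
          · subst hff
            rw [hf0]
            simp
          · rw [if_neg hff, if_neg hff, Option.or_none]
        rw [ih _ _ hprerest hinv', hsnd, updG_append]
        have hglen : (groups.map Prod.snd).length = groups.length := by simp
        -- the three filter identities
        have hA : updG (groups.map Prod.snd ++ [f0]) rest 0 groups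
            = updG (groups.map Prod.snd) ((e, f0 :: ftail) :: rest) 0 groups := by
          refine updG_ext groups 0 (fun j _ hj => ?_)
          rw [assigned_cons_ne e rest (by rw [hm]; simp)]
          refine assigned_congr (fun p _ => ?_)
          exact minPos_ext_lt_iff hf0 (by omega)
        have hB : assigned (groups.map Prod.snd ++ [f0]) rest (0 + groups.length)
            = ((rest.filter (fun p => decide (minPos (groups.map Prod.snd) p.2 = none))).filter
                (fun f => f.2.contains f0)).map Prod.fst := by
          unfold assigned
          rw [List.filter_filter]
          congr 1
          refine List.filter_congr (fun p _ => ?_)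
          rw [Bool.eq_iff_iff]
          simp only [Nat.zero_add, ← hglen, minPos_ext_len_iff hf0, Bool.and_eq_true,
            decide_eq_true_eq, List.contains_iff_mem]
          tauto
        have hC : rest.filter (fun p => decide (minPos (groups.map Prod.snd ++ [f0]) p.2 = none))
            = (rest.filter (fun p => decide (minPos (groups.map Prod.snd) p.2 = none))).filter
                (fun f => !(f.2.contains f0)) := by
          rw [List.filter_filter]
          refine List.filter_congr (fun p _ => ?_)
          rw [Bool.eq_iff_iff]
          simp only [minPos_ext_none_iff hf0, Bool.and_eq_true, decide_eq_true_eq,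
            Bool.not_eq_true']
          constructor
          · rintro ⟨h1, h2⟩; exact ⟨by simpa using h2, h1⟩
          · rintro ⟨h1, h2⟩; exact ⟨h2, by simpa using h1⟩
        rw [hA, hB, hC]
        have hhead : List.filter (fun p => decide (minPos (groups.map Prod.snd) p.2 = none)) ((e, f0 :: ftail) :: rest)
            = (e, f0 :: ftail) :: rest.filter (fun p => decide (minPos (groups.map Prod.snd) p.2 = none)) := by
          rw [List.filter_cons, if_pos (by simp [hm])]
        rw [hhead, feature_grouper_cons]
        simp [List.append_assoc]

-- ===== VERDICT (by name: the statement is the Claim_ definition above) =====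
theorem feature_grouper_spec : Claim_equal_feature_grouper := by
  intro coll _hdom hpre
  unfold Spec_feature_grouper feature_grouper_alt
  rw [fold_eq coll [] PySem.Dict.empty hpre (by intro f; simp [PySem.Dict.get?_empty, posOf])]
  simp only [List.map_nil]
  rw [show updG [] coll 0 [] = [] from rfl, List.nil_append]
  congr 1
  rw [List.filter_eq_self.mpr]
  intro p _
  simp [minPos_nil]
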